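-- pv_equiv track=rewrite | github.com/ybezginova2016/ML_training_05102022 | 06_python_tasks/10_Coprimes.py | count
-- ===== SOURCE A (Python) =====
-- def count(n):
--     # Stores Euler counts
--     phi = [0] * (n + 1)
--
--     # Store Divisor counts
--     divs = [0] * (n + 1)
--
--     # Based on Sieve of Eratosthenes
--     for i in range(1, n + 1):
--         phi[i] += i
--
--         # Update phi values of all
--         # multiples of i
--         for j in range(i * 2, n + 1, i):
--             phi[j] -= phi[i];
--
--         # Update count of divisors
--         for j in range(i, n + 1, i):
--             divs[j] += 1
--
--     # Return the final count
--     return (n - phi[n] - divs[n] + 1)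
-- ===== SOURCE B (Python) =====
-- def _gcd(a, b):
--     return a if b == 0 else _gcd(b, a % b)
--
--
-- def count(n):
--     # count k in [2, n] that neither are coprime to n nor divide n
--     total = 0
--     for k in range(2, n + 1):
--         if _gcd(k, n) > 1 and n % k != 0:
--             total += 1
--     return total
-- ===== Notes on version B (the rewrite author's own statement) =====
-- stated objective: simpler
-- what changed: Replaces the two-array sieve (totient and divisor-count tables built up to n and then combined) by a direct single pass that counts the k in [2,n] sharing a factor with n and not dividing n.
-- intended difference: For n = 0 A's formula yields one (an artifact of the leftover zero entries phi[0] = divs[0] = 0), while B returns zero, the correct count over an empty range. — e.g. on count(0): A returns 1, B returns 0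
import Mathlib
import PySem

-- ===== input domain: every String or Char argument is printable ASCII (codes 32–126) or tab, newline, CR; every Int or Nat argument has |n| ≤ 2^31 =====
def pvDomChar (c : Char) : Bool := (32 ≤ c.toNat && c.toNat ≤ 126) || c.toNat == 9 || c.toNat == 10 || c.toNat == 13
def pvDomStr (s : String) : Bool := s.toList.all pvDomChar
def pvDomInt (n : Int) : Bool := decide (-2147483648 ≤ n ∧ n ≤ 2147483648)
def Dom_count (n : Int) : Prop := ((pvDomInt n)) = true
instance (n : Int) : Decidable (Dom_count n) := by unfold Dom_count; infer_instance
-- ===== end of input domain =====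

-- B replaces A's two-array sieve by a direct count of k in [2,n] with gcd(k,n) > 1 and k ∤ n;
-- the equivalence is about the return value only.

-- ===== PORT A =====
-- A's Python lists phi/divs are mutated in place; they are modelled as Arrays (O(1) update).
-- The index helpers are exact for the in-range indices Pre_count guarantees (Python raises otherwise).
def pyAGetD (xs : Array Int) (i : Int) (d : Int) : Int :=
  if 0 ≤ i then xs.getD i.toNat d else d

def pyASetD (xs : Array Int) (i : Int) (v : Int) : Array Int :=
  if 0 ≤ i then xs.setIfInBounds i.toNat v else xs

def phiInner (nn i : Int) (phi : Array Int) : Array Int :=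
  (PySem.List.pyRange (i * 2) nn i).foldl
    (fun ph j => pyASetD ph j (pyAGetD ph j 0 - pyAGetD ph i 0)) phi

def divInner (nn i : Int) (divs : Array Int) : Array Int :=
  (PySem.List.pyRange i nn i).foldl
    (fun dv j => pyASetD dv j (pyAGetD dv j 0 + 1)) divs

def sieveStep (nn : Int) (st : Array Int × Array Int) (i : Int) : Array Int × Array Int :=
  let phi := pyASetD st.1 i (pyAGetD st.1 i 0 + i)
  (phiInner nn i phi, divInner nn i st.2)

-- pySetD/pyGetD are exact here: under Pre_count every index A touches is in range
def count (n : Int) : Int :=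
  let st := (PySem.List.pyRange 1 (n + 1)).foldl (sieveStep (n + 1))
    (Array.replicate (n + 1).toNat 0, Array.replicate (n + 1).toNat 0)
  n - pyAGetD st.1 n 0 - pyAGetD st.2 n 0 + 1

-- ===== PORT B =====
-- helper: _gcd(a, b) = a if b == 0 else _gcd(b, a % b)
def pyGcd (a b : Int) : Int :=
  if h : b = 0 then a else pyGcd b (PySem.Int.mod a b)
termination_by b.natAbs
decreasing_by
  rcases lt_or_gt_of_ne h with hb | hb
  · have := PySem.Int.mod_neg_bounds a hb; omega
  · have h1 := PySem.Int.mod_nonneg a hb; have h2 := PySem.Int.mod_lt a hb; omega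

def count_alt (n : Int) : Int :=
  (PySem.List.pyRange 2 (n + 1)).foldl
    (fun total k => if 1 < pyGcd k n ∧ PySem.Int.mod n k ≠ 0 then total + 1 else total) 0

-- ===== PRECONDITION & SPEC =====
-- A raises IndexError for n < 0 (negative index into an empty list); Pre_ excludes exactly those inputs.
def Pre_count (n : Int) : Prop := 0 ≤ n
instance (n : Int) : Decidable (Pre_count n) := by unfold Pre_count; infer_instance
def pvWitness_count : Int := 6

-- For n = 0 A's formula yields one (an artifact of the leftover zero entries phi[0] = divs[0] = 0),
-- while B returns zero, the correct count over an empty range.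
def D_count (n : Int) : Prop := n = 0
instance (n : Int) : Decidable (D_count n) := by unfold D_count; infer_instance

def Spec_count (n : Int) (out : Int) : Prop := ¬ D_count n → out = count_alt n
instance (n : Int) (out : Int) : Decidable (Spec_count n out) := by unfold Spec_count; infer_instance

def pvDiffWitness_count : Int := 0
def pvDiffWitnessOut_count : Int × Int := (1, 0)

-- ===== CLAIM (what is proved, stated in full; the proofs are below) =====
def Claim_unchanged_count : Prop := ∀ (n : Int), Dom_count n → Pre_count n → Spec_count n (count n)
def Claim_changed_count : Prop := Dom_count (pvDiffWitness_count) ∧ Pre_count (pvDiffWitness_count) ∧ D_count (pvDiffWitness_count) ∧ count (pvDiffWitness_count) = pvDiffWitnessOut_count.1 ∧ count_alt (pvDiffWitness_count) = pvDiffWitnessOut_count.2 ∧ pvDiffWitnessOut_count.1 ≠ pvDiffWitnessOut_count.2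
def Claim_exact_count : Prop := ∀ (n : Int), Dom_count n → Pre_count n → D_count n → count n ≠ count_alt n

-- ===== LEMMAS AND PROOFS =====

lemma pyRange_pos_cons {a b s : Int} (hs : 0 < s) (h : a < b) :
    PySem.List.pyRange a b s = a :: PySem.List.pyRange (a + s) b s := by
  rw [PySem.List.pyRange_of_pos a b hs, PySem.List.pyRange_of_pos (a+s) b hs]
  rw [if_pos h]
  have h0 : (0:Int) ≤ (b - a - 1) / s := Int.ediv_nonneg (by omega) (by omega)
  have hM : b - a + s - 1 = (b - a - 1) + 1 * s := by ring
  rw [hM, Int.add_mul_ediv_right _ _ (by omega : s ≠ 0)]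
  by_cases h2 : a + s < b
  · rw [if_pos h2]
    have : b - (a + s) + s - 1 = b - a - 1 := by ring
    rw [this]
    have ht : ((b - a - 1) / s + 1).toNat = ((b - a - 1) / s).toNat + 1 := by omega
    rw [ht, List.range_succ_eq_map, List.map_cons, List.map_map]
    congr 1
    · omega
    · apply List.map_congr_left
      intro k _
      simp [Function.comp]
      ring
  · rw [if_neg h2]
    have hlt : b - a - 1 < s := by omega
    have : (b - a - 1) / s = 0 := Int.ediv_eq_zero_of_lt (by omega) hlt
    rw [this]
    simp

lemma pyRange_pos_nil {a b s : Int} (hs : 0 < s) (h : b ≤ a) :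
    PySem.List.pyRange a b s = [] := by
  rw [PySem.List.pyRange_of_pos a b hs, if_neg (by omega)]
  simp

lemma pyAGetD_of_nonneg (xs : Array Int) {i : Int} (d : Int) (h : 0 ≤ i) :
    pyAGetD xs i d = xs.getD i.toNat d := by
  rw [pyAGetD, if_pos h]

lemma pyASetD_of_nonneg (xs : Array Int) {i : Int} (v : Int) (h : 0 ≤ i) :
    pyASetD xs i v = xs.setIfInBounds i.toNat v := by
  rw [pyASetD, if_pos h]

lemma size_pyASetD (xs : Array Int) (i : Int) (v : Int) : (pyASetD xs i v).size = xs.size := by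
  rw [pyASetD]
  split_ifs
  · rw [Array.size_setIfInBounds]
  · rfl

lemma getD_set_ne (l : Array Int) (i j : Nat) (v : Int) (h : i ≠ j) :
    (l.setIfInBounds i v).getD j 0 = l.getD j 0 := by
  simp [Array.getD_eq_getD_getElem?, Array.getElem?_setIfInBounds, h]

lemma getD_set_self (l : Array Int) (i : Nat) (v : Int) (h : i < l.size) :
    (l.setIfInBounds i v).getD i 0 = v := by
  simp [Array.getD_eq_getD_getElem?, Array.getElem?_setIfInBounds, h]

lemma agetD_replicate (n i : Nat) (h : i < n) : (Array.replicate n (0:Int)).getD i 0 = 0 := by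
  simp [Array.getD_eq_getD_getElem?, Array.getElem?_replicate, h]

lemma phiInner_fold (i nn : Int) (hi : 0 < i) :
    ∀ (a : Int) (ph : Array Int) (t : Nat), i < a → nn ≤ (ph.size : Int) →
    ((PySem.List.pyRange a nn i).foldl
      (fun ph j => pyASetD ph j (pyAGetD ph j 0 - pyAGetD ph i 0)) ph).getD t 0
    = ph.getD t 0 - (if a ≤ (t : Int) ∧ (t : Int) < nn ∧ i ∣ ((t : Int) - a) then ph.getD i.toNat 0 else 0) := by
  intro a ph t hia hlen
  generalize hM : (nn - a).toNat = M
  induction M using Nat.strong_induction_on generalizing a ph with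
  | _ M IH =>
    by_cases hab : a < nn
    · rw [pyRange_pos_cons hi hab, List.foldl_cons]
      have ha0 : 0 ≤ a := by omega
      have haN : a.toNat < ph.size := by omega
      have hit : i.toNat ≠ a.toNat := by omega
      set v := pyAGetD ph a 0 - pyAGetD ph i 0 with hv
      have hset : pyASetD ph a v = ph.setIfInBounds a.toNat v :=
        pyASetD_of_nonneg ph v ha0
      rw [hset]
      rw [IH (nn - (a+i)).toNat (by omega) (a+i) (ph.setIfInBounds a.toNat v) (by omega)
        (by rw [Array.size_setIfInBounds]; exact hlen) rfl]
      have hgi : (ph.setIfInBounds a.toNat v).getD i.toNat 0 = ph.getD i.toNat 0 :=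
        getD_set_ne _ _ _ _ hit.symm
      rw [hgi]
      by_cases hta : (t : Int) = a
      · have htn : t = a.toNat := by omega
        have hts : (ph.setIfInBounds a.toNat v).getD t 0 = v := by
          rw [htn]; exact getD_set_self _ _ _ haN
        rw [hts]
        rw [if_neg (by omega), if_pos ⟨by omega, by omega, by rw [hta]; simp⟩]
        rw [hv]
        rw [pyAGetD_of_nonneg ph 0 ha0, pyAGetD_of_nonneg ph 0 (by omega)]
        rw [htn]
        ring
      · have hts : (ph.setIfInBounds a.toNat v).getD t 0 = ph.getD t 0 :=
          getD_set_ne _ _ _ _ (by omega)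
        rw [hts]
        have hiff : (a + i ≤ (t:Int) ∧ (t:Int) < nn ∧ i ∣ ((t:Int) - (a+i))) ↔
            (a ≤ (t:Int) ∧ (t:Int) < nn ∧ i ∣ ((t:Int) - a)) := by
          constructor
          · rintro ⟨h1, h2, q, hq⟩
            exact ⟨by omega, h2, q + 1, by rw [mul_add, ← hq]; ring⟩
          · rintro ⟨h1, h2, q, hq⟩
            have hq1 : 1 ≤ q := by
              rcases lt_or_ge q 1 with h | h
              · exfalso
                have hq0 : q ≤ 0 := by omega
                have : i * q ≤ 0 := mul_nonpos_of_nonneg_of_nonpos (by omega) hq0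
                have htgt : (t:Int) - a > 0 := by omega
                omega
              · exact h
            refine ⟨?_, h2, q - 1, by rw [mul_sub, ← hq]; ring⟩
            have : i * 1 ≤ i * q := by
              apply mul_le_mul_of_nonneg_left hq1 (by omega)
            omega
        by_cases hc : a + i ≤ (t:Int) ∧ (t:Int) < nn ∧ i ∣ ((t:Int) - (a+i))
        · rw [if_pos hc, if_pos (hiff.mp hc)]
        · rw [if_neg hc, if_neg (fun hh => hc (hiff.mpr hh))]
    · rw [pyRange_pos_nil hi (by omega), List.foldl_nil, if_neg (by omega)]
      ring

lemma divInner_fold (i nn : Int) (hi : 0 < i) :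
    ∀ (a : Int) (dv : Array Int) (t : Nat), 0 < a → nn ≤ (dv.size : Int) →
    ((PySem.List.pyRange a nn i).foldl
      (fun dv j => pyASetD dv j (pyAGetD dv j 0 + 1)) dv).getD t 0
    = dv.getD t 0 + (if a ≤ (t : Int) ∧ (t : Int) < nn ∧ i ∣ ((t : Int) - a) then 1 else 0) := by
  intro a dv t ha0 hlen
  generalize hM : (nn - a).toNat = M
  induction M using Nat.strong_induction_on generalizing a dv with
  | _ M IH =>
    by_cases hab : a < nn
    · rw [pyRange_pos_cons hi hab, List.foldl_cons]
      have haN : a.toNat < dv.size := by omega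
      set v := pyAGetD dv a 0 + 1 with hv
      have hset : pyASetD dv a v = dv.setIfInBounds a.toNat v :=
        pyASetD_of_nonneg dv v (by omega)
      rw [hset]
      rw [IH (nn - (a+i)).toNat (by omega) (a+i) (dv.setIfInBounds a.toNat v) (by omega)
        (by rw [Array.size_setIfInBounds]; exact hlen) rfl]
      by_cases hta : (t : Int) = a
      · have htn : t = a.toNat := by omega
        have hts : (dv.setIfInBounds a.toNat v).getD t 0 = v := by
          rw [htn]; exact getD_set_self _ _ _ haN
        rw [hts]
        rw [if_neg (by omega), if_pos ⟨by omega, by omega, by rw [hta]; simp⟩]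
        rw [hv, pyAGetD_of_nonneg dv 0 (by omega), htn]
        ring
      · have hts : (dv.setIfInBounds a.toNat v).getD t 0 = dv.getD t 0 :=
          getD_set_ne _ _ _ _ (by omega)
        rw [hts]
        have hiff : (a + i ≤ (t:Int) ∧ (t:Int) < nn ∧ i ∣ ((t:Int) - (a+i))) ↔
            (a ≤ (t:Int) ∧ (t:Int) < nn ∧ i ∣ ((t:Int) - a)) := by
          constructor
          · rintro ⟨h1, h2, q, hq⟩
            exact ⟨by omega, h2, q + 1, by rw [mul_add, ← hq]; ring⟩
          · rintro ⟨h1, h2, q, hq⟩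
            have hq1 : 1 ≤ q := by
              rcases lt_or_ge q 1 with h | h
              · exfalso
                have hq0 : q ≤ 0 := by omega
                have : i * q ≤ 0 := mul_nonpos_of_nonneg_of_nonpos (by omega) hq0
                omega
              · exact h
            refine ⟨?_, h2, q - 1, by rw [mul_sub, ← hq]; ring⟩
            have : i * 1 ≤ i * q := mul_le_mul_of_nonneg_left hq1 (by omega)
            omega
        by_cases hc : a + i ≤ (t:Int) ∧ (t:Int) < nn ∧ i ∣ ((t:Int) - (a+i))
        · rw [if_pos hc, if_pos (hiff.mp hc)]
        · rw [if_neg hc, if_neg (fun hh => hc (hiff.mpr hh))]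
    · rw [pyRange_pos_nil hi (by omega), List.foldl_nil, if_neg (by omega)]
      ring


def phiModel (k t : Nat) : Int :=
  (if 1 ≤ t ∧ t ≤ k then (t : Int) else 0)
    - ∑ i ∈ (Finset.Icc 1 k).filter (fun i => i ∣ t ∧ 2 * i ≤ t), (Nat.totient i : Int)

def divModel (k t : Nat) : Int :=
  if 1 ≤ t then (((Finset.Icc 1 k).filter (fun i => i ∣ t)).card : Int) else 0

lemma filter_eq_properDivisors (K m : Nat) (hm : 1 ≤ m) (hmK : m ≤ K + 1) :
    (Finset.Icc 1 K).filter (fun i => i ∣ m ∧ 2 * i ≤ m) = m.properDivisors := by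
  ext i
  simp only [Finset.mem_filter, Finset.mem_Icc, Nat.mem_properDivisors]
  constructor
  · rintro ⟨⟨h1, h2⟩, hdvd, h2i⟩
    exact ⟨hdvd, by omega⟩
  · rintro ⟨hdvd, hlt⟩
    have hi1 : 1 ≤ i := by
      rcases Nat.eq_zero_or_pos i with h | h
      · subst h; simp at hdvd; omega
      · omega
    obtain ⟨q, hq⟩ := hdvd
    have hq2 : 2 ≤ q := by
      rcases Nat.lt_or_ge q 2 with h | h
      · interval_cases q <;> omega
      · exact h
    have h2i : 2 * i ≤ m := by
      calc 2 * i = i * 2 := by ring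
        _ ≤ i * q := Nat.mul_le_mul_left i hq2
        _ = m := hq.symm
    exact ⟨⟨hi1, by omega⟩, ⟨q, hq⟩, h2i⟩

lemma sum_properDivisors_totient (m : Nat) (hm : 1 ≤ m) :
    ∑ i ∈ m.properDivisors, (Nat.totient i : Int) = (m : Int) - Nat.totient m := by
  have h1 : ∑ i ∈ m.divisors, Nat.totient i = m := Nat.sum_totient m
  have h2 : m.divisors = insert m m.properDivisors :=
    (Nat.insert_self_properDivisors (by omega)).symm
  rw [h2, Finset.sum_insert Nat.self_notMem_properDivisors] at h1
  have : ∑ i ∈ m.properDivisors, Nat.totient i = m - Nat.totient m := by omega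
  rw [← Nat.cast_sum, this]
  have hle : Nat.totient m ≤ m := by omega
  push_cast [hle]
  ring

lemma Icc_succ_insert (k : Nat) : Finset.Icc 1 (k+1) = insert (k+1) (Finset.Icc 1 k) := by
  ext x; simp; omega

lemma dvd_cast_helper (k t : Nat) (m : Int) (hm : ((k:Int)+1) ∣ m) :
    (((k:Int)+1) ∣ ((t:Int) - ((k:Int)+1) - m)) ↔ ((k+1) ∣ t) := by
  have h1 : ((k:Int)+1) ∣ ((t:Int) - ((k:Int)+1) - m) ↔ ((k:Int)+1) ∣ (t:Int) := by
    constructor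
    · intro h
      have h' := dvd_add (dvd_add h (dvd_refl ((k:Int)+1))) hm
      have e : (t:Int) - ((k:Int)+1) - m + ((k:Int)+1) + m = (t:Int) := by ring
      rwa [e] at h'
    · intro h
      exact dvd_sub (dvd_sub h (dvd_refl _)) hm
  rw [h1, show ((k:Int)+1) = ((k+1 : Nat) : Int) by push_cast; ring, Int.natCast_dvd_natCast]

lemma phiModel_step (N k t : Nat) (hk : k + 1 ≤ N) (ht : t ≤ N) :
    (if t = k + 1 then ((k+1 : Nat) : Int) + phiModel k (k+1) else phiModel k t)
      - (if ((k:Int)+1)*2 ≤ (t:Int) ∧ (t:Int) < (N:Int)+1 ∧ ((k:Int)+1) ∣ ((t:Int) - ((k:Int)+1)*2)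
          then ((k+1 : Nat) : Int) + phiModel k (k+1) else 0)
    = phiModel (k+1) t := by
  have hval : ((k+1 : Nat) : Int) + phiModel k (k+1) = (Nat.totient (k+1) : Int) := by
    unfold phiModel
    rw [if_neg (by omega), filter_eq_properDivisors k (k+1) (by omega) (by omega),
      sum_properDivisors_totient (k+1) (by omega)]
    push_cast
    ring
  rw [hval]
  have hcond : (((k:Int)+1)*2 ≤ (t:Int) ∧ (t:Int) < (N:Int)+1 ∧ ((k:Int)+1) ∣ ((t:Int) - ((k:Int)+1)*2))
      ↔ ((k+1) ∣ t ∧ 2*(k+1) ≤ t) := by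
    constructor
    · rintro ⟨h1, h2, h3⟩
      have := (dvd_cast_helper k t ((k:Int)+1) (dvd_refl _)).mp (by
        have : (t:Int) - ((k:Int)+1)*2 = (t:Int) - ((k:Int)+1) - ((k:Int)+1) := by ring
        rwa [this] at h3)
      exact ⟨this, by omega⟩
    · rintro ⟨h1, h2⟩
      refine ⟨by omega, by omega, ?_⟩
      have := (dvd_cast_helper k t ((k:Int)+1) (dvd_refl _)).mpr h1
      have heq : (t:Int) - ((k:Int)+1) - ((k:Int)+1) = (t:Int) - ((k:Int)+1)*2 := by ring
      rwa [heq] at this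
  simp only [hcond]
  have hif : ∀ x y : Int, (if 1 ≤ t ∧ t ≤ k + 1 then x else y) = (if t = k + 1 then x else if 1 ≤ t ∧ t ≤ k then x else y) := by
    intro x y
    by_cases h1 : t = k + 1
    · rw [if_pos h1, if_pos (by omega)]
    · rw [if_neg h1]
      by_cases h2 : 1 ≤ t ∧ t ≤ k
      · rw [if_pos h2, if_pos (by omega)]
      · rw [if_neg h2, if_neg (by omega)]
  conv_rhs => rw [phiModel, Icc_succ_insert, Finset.filter_insert, hif]
  by_cases hP : (k+1) ∣ t ∧ 2*(k+1) ≤ t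
  · have htne : t ≠ k + 1 := by omega
    rw [if_pos hP, if_pos hP, Finset.sum_insert (by simp), if_neg htne, if_neg htne]
    unfold phiModel
    ring
  · rw [if_neg hP, if_neg hP]
    by_cases hta : t = k + 1
    · rw [if_pos hta, if_pos hta, hval.symm]
      unfold phiModel
      rw [if_neg (by omega)]
      subst hta
      ring
    · rw [if_neg hta, if_neg hta]
      unfold phiModel
      ring

lemma divModel_step (N k t : Nat) (hk : k + 1 ≤ N) (ht : t ≤ N) :
    divModel k t + (if ((k:Int)+1) ≤ (t:Int) ∧ (t:Int) < (N:Int)+1 ∧ ((k:Int)+1) ∣ ((t:Int) - ((k:Int)+1))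
        then 1 else 0)
    = divModel (k+1) t := by
  have hcond : (((k:Int)+1) ≤ (t:Int) ∧ (t:Int) < (N:Int)+1 ∧ ((k:Int)+1) ∣ ((t:Int) - ((k:Int)+1)))
      ↔ ((k+1) ∣ t ∧ 1 ≤ t) := by
    constructor
    · rintro ⟨h1, h2, h3⟩
      have := (dvd_cast_helper k t 0 (dvd_zero _)).mp (by simpa using h3)
      exact ⟨this, by omega⟩
    · rintro ⟨h1, h2⟩
      have hle : k + 1 ≤ t := Nat.le_of_dvd (by omega) h1
      have := (dvd_cast_helper k t 0 (dvd_zero _)).mpr h1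
      refine ⟨by omega, by omega, by simpa using this⟩
  simp only [hcond]
  unfold divModel
  by_cases ht1 : 1 ≤ t
  · rw [if_pos ht1, if_pos ht1, Icc_succ_insert, Finset.filter_insert]
    by_cases hP : (k+1) ∣ t
    · rw [if_pos hP, if_pos ⟨hP, ht1⟩, Finset.card_insert_of_notMem (by simp)]
      push_cast
      ring
    · rw [if_neg hP, if_neg (fun h => hP h.1)]
      ring
  · rw [if_neg ht1, if_neg ht1, if_neg (by omega : ¬((k+1) ∣ t ∧ 1 ≤ t))]
    ring

lemma foldl_pySetD_length (f : Array Int → Int → Int) :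
    ∀ (L : List Int) (ph : Array Int),
      (L.foldl (fun ph j => pyASetD ph j (f ph j)) ph).size = ph.size := by
  intro L
  induction L with
  | nil => intro ph; simp
  | cons a L ih => intro ph; rw [List.foldl_cons, ih, size_pyASetD]

lemma sieve_inv (N : Nat) : ∀ (k : Nat), k ≤ N →
    ((PySem.List.pyRange 1 ((k : Int) + 1)).foldl (sieveStep ((N : Int) + 1))
        (Array.replicate (N + 1) 0, Array.replicate (N + 1) 0)).1.size = N + 1 ∧
    ((PySem.List.pyRange 1 ((k : Int) + 1)).foldl (sieveStep ((N : Int) + 1))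
        (Array.replicate (N + 1) 0, Array.replicate (N + 1) 0)).2.size = N + 1 ∧
    ∀ t : Nat, t ≤ N →
      ((PySem.List.pyRange 1 ((k : Int) + 1)).foldl (sieveStep ((N : Int) + 1))
        (Array.replicate (N + 1) 0, Array.replicate (N + 1) 0)).1.getD t 0 = phiModel k t ∧
      ((PySem.List.pyRange 1 ((k : Int) + 1)).foldl (sieveStep ((N : Int) + 1))
        (Array.replicate (N + 1) 0, Array.replicate (N + 1) 0)).2.getD t 0 = divModel k t := by
  intro k
  induction k with
  | zero =>
    intro _
    rw [show ((0 : Nat) : Int) + 1 = 1 by norm_num, PySem.List.pyRange_one_eq_nil (le_refl 1),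
      List.foldl_nil]
    refine ⟨by simp, by simp, fun t ht => ⟨?_, ?_⟩⟩
    · rw [agetD_replicate _ _ (by omega), phiModel]
      rw [if_neg (by omega), show Finset.Icc 1 0 = (∅ : Finset Nat) by simp]
      simp
    · rw [agetD_replicate _ _ (by omega), divModel]
      rw [show Finset.Icc 1 0 = (∅ : Finset Nat) by simp]
      by_cases h : 1 ≤ t
      · rw [if_pos h]; simp
      · rw [if_neg h]
  | succ k IH =>
    intro hk
    obtain ⟨hl1, hl2, hpt⟩ := IH (by omega)
    have hcast : ((k + 1 : Nat) : Int) + 1 = ((k : Int) + 1) + 1 := by push_cast; ring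
    rw [hcast, PySem.List.pyRange_one_succ_right (by omega : (1:Int) ≤ (k:Int)+1),
      List.foldl_append, List.foldl_cons, List.foldl_nil]
    set stk := (PySem.List.pyRange 1 ((k : Int) + 1)).foldl (sieveStep ((N : Int) + 1))
        (Array.replicate (N + 1) 0, Array.replicate (N + 1) (0:Int)) with hstk
    set i : Int := (k : Int) + 1 with hidef
    have hi0 : 0 < i := by omega
    have hitn : i.toNat = k + 1 := by omega
    -- the updated phi list after "phi[i] += i"
    have hsetA : pyASetD stk.1 i (pyAGetD stk.1 i 0 + i)
        = stk.1.setIfInBounds (k+1) (stk.1.getD (k+1) 0 + i) := by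
      rw [pyASetD_of_nonneg _ _ (by omega), pyAGetD_of_nonneg _ _ (by omega), hitn]
    set phiA := stk.1.setIfInBounds (k+1) (stk.1.getD (k+1) 0 + i) with hphiAdef
    have hlenA : phiA.size = N + 1 := by rw [hphiAdef, Array.size_setIfInBounds, hl1]
    have hreadA : phiA.getD (k+1) 0 = ((k+1 : Nat) : Int) + phiModel k (k+1) := by
      rw [hphiAdef, getD_set_self _ _ _ (by omega), (hpt (k+1) (by omega)).1]
      push_cast [hidef]
      ring
    have hphiA : ∀ t : Nat, t ≤ N →
        phiA.getD t 0 = (if t = k+1 then ((k+1 : Nat) : Int) + phiModel k (k+1) else phiModel k t) := by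
      intro t ht
      by_cases h : t = k + 1
      · rw [if_pos h, h, hreadA]
      · rw [if_neg h, hphiAdef, getD_set_ne _ _ _ _ (fun hh => h hh.symm), (hpt t ht).1]
    have step1 : sieveStep ((N : Int) + 1) stk i
        = (phiInner ((N : Int) + 1) i phiA, divInner ((N : Int) + 1) i stk.2) := by
      rw [sieveStep, hsetA]
    rw [step1]
    have hlen1 : (phiInner ((N : Int) + 1) i phiA).size = N + 1 := by
      rw [phiInner]
      rw [foldl_pySetD_length (fun ph j => pyAGetD ph j 0 - pyAGetD ph i 0)]
      exact hlenA
    have hlen2 : (divInner ((N : Int) + 1) i stk.2).size = N + 1 := by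
      rw [divInner]
      rw [foldl_pySetD_length (fun dv j => pyAGetD dv j 0 + 1)]
      exact hl2
    refine ⟨hlen1, hlen2, fun t ht => ⟨?_, ?_⟩⟩
    · rw [phiInner, phiInner_fold i ((N : Int) + 1) hi0 (i*2) phiA t (by omega)
        (by rw [hlenA]; push_cast; omega)]
      rw [hphiA t ht, hitn, hreadA]
      have := phiModel_step N k t hk ht
      rw [hidef]
      convert this using 3 <;> push_cast <;> ring_nf
    · rw [divInner, divInner_fold i ((N : Int) + 1) hi0 i stk.2 t (by omega)
        (by rw [hl2]; push_cast; omega)]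
      rw [(hpt t ht).2]
      have := divModel_step N k t hk ht
      rw [hidef]
      convert this using 3 <;> push_cast <;> ring_nf

lemma phiModel_final (N : Nat) (hN : 1 ≤ N) : phiModel N N = (Nat.totient N : Int) := by
  rw [phiModel, if_pos ⟨hN, le_refl N⟩,
    filter_eq_properDivisors N N hN (by omega), sum_properDivisors_totient N hN]
  ring

lemma divModel_final (N : Nat) (hN : 1 ≤ N) : divModel N N = ((Nat.divisors N).card : Int) := by
  rw [divModel, if_pos hN]
  rw [Nat.divisors]
  have h : Finset.Icc 1 N = Finset.Ico 1 (N + 1) := by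
    ext x; simp [Nat.lt_succ_iff]
  rw [h]

lemma countA_eq (N : Nat) (hN : 1 ≤ N) :
    count (N : Int) = (N : Int) - Nat.totient N - (Nat.divisors N).card + 1 := by
  rw [count]
  have htn : ((N : Int) + 1).toNat = N + 1 := by omega
  rw [htn]
  obtain ⟨hl1, hl2, hpt⟩ := sieve_inv N N (le_refl N)
  obtain ⟨hp, hd⟩ := hpt N (le_refl N)
  rw [pyAGetD_of_nonneg _ _ (by omega : (0:Int) ≤ (N:Int)),
    pyAGetD_of_nonneg _ _ (by omega : (0:Int) ≤ (N:Int))]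
  have htn2 : ((N : Int)).toNat = N := by omega
  rw [htn2]
  rw [hp]
  rw [hd]
  rw [phiModel_final N hN]
  rw [divModel_final N hN]

lemma pyGcd_natCast (y : Nat) : ∀ (x : Nat), pyGcd (x : Int) (y : Int) = (Nat.gcd x y : Int) := by
  induction y using Nat.strong_induction_on with
  | _ y IH =>
    intro x
    rw [pyGcd]
    by_cases hy : (y : Int) = 0
    · rw [dif_pos hy]
      have : y = 0 := by omega
      subst this
      simp
    · rw [dif_neg hy]
      have hy0 : 0 < (y : Int) := by omega
      rw [PySem.Int.mod_eq_emod_of_pos hy0, ← Int.natCast_emod]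
      rw [IH (x % y) (Nat.mod_lt x (by omega)) y]
      rw [Nat.gcd_comm y (x % y), ← Nat.gcd_rec, Nat.gcd_comm]

lemma countAlt_foldl (n : Int) :
    ∀ (L : List Int) (t : Int),
      L.foldl (fun total k => if 1 < pyGcd k n ∧ PySem.Int.mod n k ≠ 0 then total + 1 else total) t
      = t + (L.countP (fun k => decide (1 < pyGcd k n ∧ PySem.Int.mod n k ≠ 0)) : Int) := by
  intro L
  induction L with
  | nil => intro t; simp
  | cons a L ih =>
    intro t
    rw [List.foldl_cons, ih, List.countP_cons]
    by_cases h : 1 < pyGcd a n ∧ PySem.Int.mod n a ≠ 0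
    · rw [if_pos h, if_pos (by simpa using h)]
      push_cast
      ring
    · rw [if_neg h, if_neg (by simpa using h)]
      push_cast
      ring

lemma countP_range_eq_card (P : Nat → Prop) [DecidablePred P] :
    ∀ (M : Nat), (List.range M).countP (fun j => decide (P j)) = ((Finset.range M).filter P).card := by
  intro M
  induction M with
  | zero => simp
  | succ M ih =>
    rw [List.range_succ, List.countP_append, ih, Finset.range_add_one, Finset.filter_insert]
    by_cases h : P M
    · rw [if_pos h, Finset.card_insert_of_notMem (by simp)]
      simp [h]
    · rw [if_neg h]
      simp [h]

abbrev predB (N k : Nat) : Prop := Nat.gcd k N ≠ 1 ∧ ¬ k ∣ N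

lemma card_coprime_Icc (N : Nat) (hN : 1 ≤ N) :
    ((Finset.Icc 1 N).filter (fun k => Nat.gcd k N = 1)).card = Nat.totient N := by
  rcases Nat.lt_or_ge N 2 with h2 | h2
  · have : N = 1 := by omega
    subst this
    decide
  · rw [Nat.totient_eq_card_coprime]
    congr 1
    ext k
    simp only [Finset.mem_filter, Finset.mem_Icc, Finset.mem_range]
    constructor
    · rintro ⟨⟨h1, hle⟩, hg⟩
      refine ⟨?_, ?_⟩
      · rcases Nat.lt_or_ge k N with h | h
        · exact h
        · exfalso
          have : k = N := by omega
          subst this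
          rw [Nat.gcd_self] at hg
          omega
      · rwa [Nat.Coprime, Nat.gcd_comm]
    · rintro ⟨hlt, hc⟩
      have hk1 : 1 ≤ k := by
        rcases Nat.eq_zero_or_pos k with h | h
        · exfalso
          subst h
          rw [Nat.Coprime, Nat.gcd_zero_right] at hc
          omega
        · exact h
      exact ⟨⟨hk1, by omega⟩, by rwa [Nat.gcd_comm, ← Nat.Coprime]⟩

lemma inclusion_exclusion (N : Nat) (hN : 1 ≤ N) :
    ((Finset.Icc 2 N).filter (predB N)).card + Nat.totient N + (Nat.divisors N).card = N + 1 := by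
  have hext : (Finset.Icc 2 N).filter (predB N) = (Finset.Icc 1 N).filter (predB N) := by
    ext k
    simp only [Finset.mem_filter, Finset.mem_Icc]
    constructor
    · rintro ⟨⟨h1, h2⟩, hp⟩
      exact ⟨⟨by omega, h2⟩, hp⟩
    · rintro ⟨⟨h1, h2⟩, hp⟩
      refine ⟨⟨?_, h2⟩, hp⟩
      rcases Nat.lt_or_ge k 2 with h | h
      · exfalso
        have : k = 1 := by omega
        subst this
        exact hp.1 (Nat.gcd_one_left N)
      · exact h
  rw [hext]
  have h1 : ((Finset.Icc 1 N).filter (fun k => Nat.gcd k N = 1 ∨ k ∣ N)).card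
      + ((Finset.Icc 1 N).filter (fun k => ¬(Nat.gcd k N = 1 ∨ k ∣ N))).card
      = (Finset.Icc 1 N).card :=
    Finset.card_filter_add_card_filter_not _
  have h2 : (Finset.Icc 1 N).filter (fun k => ¬(Nat.gcd k N = 1 ∨ k ∣ N))
      = (Finset.Icc 1 N).filter (predB N) := by
    apply Finset.filter_congr
    intro k _
    unfold predB
    tauto
  have h3 : ((Finset.Icc 1 N).filter (fun k => Nat.gcd k N = 1 ∨ k ∣ N)).card
      + ((Finset.Icc 1 N).filter (fun k => Nat.gcd k N = 1 ∧ k ∣ N)).card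
      = ((Finset.Icc 1 N).filter (fun k => Nat.gcd k N = 1)).card
      + ((Finset.Icc 1 N).filter (fun k => k ∣ N)).card := by
    rw [Finset.filter_or, Finset.filter_and]
    exact Finset.card_union_add_card_inter _ _
  have h4 : (Finset.Icc 1 N).filter (fun k => Nat.gcd k N = 1 ∧ k ∣ N) = {1} := by
    ext k
    simp only [Finset.mem_filter, Finset.mem_Icc, Finset.mem_singleton]
    constructor
    · rintro ⟨⟨hk1, hkN⟩, hg, hd⟩
      have : k ∣ Nat.gcd k N := Nat.dvd_gcd (dvd_refl k) hd
      rw [hg] at this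
      exact Nat.dvd_one.mp this
    · rintro rfl
      exact ⟨⟨le_refl 1, hN⟩, Nat.gcd_one_left N, one_dvd N⟩
  have h5 : ((Finset.Icc 1 N).filter (fun k => k ∣ N)).card = (Nat.divisors N).card := by
    rw [Nat.divisors]
    have h : Finset.Icc 1 N = Finset.Ico 1 (N + 1) := by
      ext x; simp [Nat.lt_succ_iff]
    rw [h]
  have h6 := card_coprime_Icc N hN
  have h7 : (Finset.Icc 1 N).card = N := by
    rw [Nat.card_Icc]
    omega
  rw [h2] at h1
  rw [h4] at h3
  rw [Finset.card_singleton] at h3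
  omega

lemma countAlt_eq (N : Nat) (hN : 1 ≤ N) :
    count_alt (N : Int) = (N : Int) - Nat.totient N - (Nat.divisors N).card + 1 := by
  rw [count_alt, countAlt_foldl]
  rw [PySem.List.pyRange_one, List.countP_map]
  have hM : ((N : Int) + 1 - 2).toNat = N - 1 := by omega
  rw [hM]
  have hfun : ((fun k => decide (1 < pyGcd k (N:Int) ∧ PySem.Int.mod (N:Int) k ≠ 0))
        ∘ (fun k : Nat => (2:Int) + (k:Int)))
      = (fun j : Nat => decide (predB N (2 + j))) := by
    funext j
    simp only [Function.comp]
    apply Bool.decide_congr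
    have hcast : (2 : Int) + (j : Int) = ((2 + j : Nat) : Int) := by push_cast; ring
    rw [hcast, pyGcd_natCast N (2+j)]
    unfold predB
    constructor
    · rintro ⟨hg, hm⟩
      refine ⟨by omega, ?_⟩
      intro hdvd
      exact hm ((PySem.Int.mod_eq_zero_iff_dvd _ _).mpr (Int.natCast_dvd_natCast.mpr hdvd))
    · rintro ⟨hg, hd⟩
      have hgpos : 0 < Nat.gcd (2+j) N := Nat.gcd_pos_of_pos_left N (by omega)
      refine ⟨by omega, ?_⟩
      intro hm
      exact hd (Int.natCast_dvd_natCast.mp ((PySem.Int.mod_eq_zero_iff_dvd _ _).mp hm))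
  rw [hfun, countP_range_eq_card (fun j => predB N (2 + j)) (N-1)]
  have hbij : ((Finset.range (N-1)).filter (fun j => predB N (2 + j))).card
      = ((Finset.Icc 2 N).filter (predB N)).card := by
    refine Finset.card_bij' (fun j _ => 2 + j) (fun k _ => k - 2) ?hi ?hj ?hli ?hri
    case hi =>
      intro a ha
      simp only [Finset.mem_filter, Finset.mem_range] at ha
      simp only [Finset.mem_filter, Finset.mem_Icc]
      exact ⟨⟨by omega, by omega⟩, ha.2⟩
    case hj =>
      intro a ha
      simp only [Finset.mem_filter, Finset.mem_Icc] at ha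
      simp only [Finset.mem_filter, Finset.mem_range]
      refine ⟨by omega, ?_⟩
      have h22 : 2 + (a - 2) = a := by omega
      rw [h22]
      exact ha.2
    case hli =>
      intro a _
      dsimp only
      omega
    case hri =>
      intro a ha
      simp only [Finset.mem_filter, Finset.mem_Icc] at ha
      dsimp only
      omega
  rw [hbij]
  have hie := inclusion_exclusion N hN
  have hb1 : ((Finset.Icc 2 N).filter (predB N)).card = N + 1 - Nat.totient N - (Nat.divisors N).card := by omega
  rw [hb1]
  omega

-- ===== VERDICT (by name: the statement is the Claim_ definition above) =====
theorem count_spec : Claim_unchanged_count := by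
  intro n _ hpre hD
  have h1 : 1 ≤ n := by
    have hne : n ≠ 0 := hD
    have h0 : (0:Int) ≤ n := hpre
    omega
  have hN : n = ((n.toNat : Nat) : Int) := by omega
  rw [hN, countA_eq n.toNat (by omega), countAlt_eq n.toNat (by omega)]

theorem count_changed : Claim_changed_count := by unfold Claim_changed_count; decide

theorem count_tight : Claim_exact_count := by
  intro n _ _ hD
  have h0 : n = 0 := hD
  subst h0
  decide
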